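-- pv_equiv track=rewrite | github.com/interrogator/buzzword | explorer/helpers.py | _make_multiword_query
-- ===== SOURCE A (Python) =====
-- def _make_multiword_query(query, col, regex):
--     """
--     Turns a query with spaces into a multiword depgrep query!
--
--     Vorbericht für jedermann
--
--     becomes
--
--     'w"Vorbericht" + (w"für" + w"jedermann")'
--     """
--     out = []
--     tokens = [i.strip() for i in query.split(" ")]
--     boundary = "/" if regex else '"'
--     # # A + B       A immediately precedes B.
--     rightbracks = ")" * (len(tokens) - 2)
--     last_token = len(tokens) - 1
--     for i, token in enumerate(tokens):
--         leftbrack = "" if i in {0, last_token} else "("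
--         unit = f"{leftbrack}{col}{boundary}{token}{boundary}"
--         if i+1 == len(tokens):
--             unit += rightbracks
--         out.append(unit)
--     return " + ".join(out), len(tokens)
-- ===== SOURCE B (Python) =====
-- def _make_multiword_query(query, col, regex):
--     """Right-fold construction: one token -> unit; two -> 'u0 + u1'; more -> 'u0 + (rest)'."""
--     boundary = "/" if regex else '"'
--     tokens = [t.strip() for t in query.split(" ")]
--
--     def build(ts):
--         unit = f"{col}{boundary}{ts[0]}{boundary}"
--         if len(ts) == 1:
--             return unit
--         if len(ts) == 2:
--             return unit + " + " + f"{col}{boundary}{ts[1]}{boundary}"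
--         return unit + " + (" + build(ts[1:]) + ")"
--
--     return build(tokens), len(tokens)
-- ===== Notes on version B (the rewrite author's own statement) =====
-- stated objective: simpler
-- what changed: Replaced the index loop with precomputed closing-bracket string, last-index set membership and join by a direct structural recursion over the token list (one token -> unit, two -> 'u0 + u1', more -> 'u0 + (' + rest + ')'), so no enumerate, no bracket counting and no join are needed.
import Mathlib
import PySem

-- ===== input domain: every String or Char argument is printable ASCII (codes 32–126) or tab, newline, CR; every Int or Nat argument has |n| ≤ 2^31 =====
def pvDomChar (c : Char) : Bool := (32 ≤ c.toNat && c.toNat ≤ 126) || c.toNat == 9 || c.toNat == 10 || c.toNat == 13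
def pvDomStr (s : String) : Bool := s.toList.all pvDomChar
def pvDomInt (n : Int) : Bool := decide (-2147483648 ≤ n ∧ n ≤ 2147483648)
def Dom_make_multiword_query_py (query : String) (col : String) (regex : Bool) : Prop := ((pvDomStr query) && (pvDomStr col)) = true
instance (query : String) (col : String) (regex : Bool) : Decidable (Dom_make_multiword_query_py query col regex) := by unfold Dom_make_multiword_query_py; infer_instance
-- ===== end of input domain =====

-- B rebuilds the query by structural recursion over the token list instead of A's
-- index loop with precomputed closing brackets; same output, same cost ("alternative decomposition").

-- ===== PORT A =====
def make_multiword_query_py (query : String) (col : String) (regex : Bool) : String × Int :=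
  -- tokens = [i.strip() for i in query.split(" ")]   (sep " " ≠ "", so split? is always `some`)
  let tokens := ((PySem.Str.split? query " ").getD []).map PySem.Str.strip
  let boundary := if regex then "/" else "\""
  -- ")" * (len(tokens) - 2): Python's * with a negative count gives "", like Nat subtraction
  let rightbracks := String.ofList (List.replicate (tokens.length - 2) ')')
  let last_token : Int := (tokens.length : Int) - 1
  let out := (PySem.List.enumerate tokens 0).foldl (fun out it =>
      let leftbrack := if it.1 = 0 ∨ it.1 = last_token then "" else "("
      let unit := leftbrack ++ col ++ boundary ++ it.2 ++ boundary
      let unit := if it.1 + 1 = (tokens.length : Int) then unit ++ rightbracks else unit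
      out ++ [unit]) []
  (PySem.Str.join " + " out, (tokens.length : Int))

-- ===== PORT B =====
def mmqUnit (col b t : String) : String := col ++ b ++ t ++ b

def mmqBuild (col b : String) : List String → String
  | [] => ""   -- unreachable: split(" ") always yields at least one token, so Source B's build is never called on []
  | [t] => mmqUnit col b t
  | [t1, t2] => mmqUnit col b t1 ++ " + " ++ mmqUnit col b t2
  | t :: r1 :: r2 :: rest => mmqUnit col b t ++ " + (" ++ mmqBuild col b (r1 :: r2 :: rest) ++ ")"

def make_multiword_query_py_alt (query : String) (col : String) (regex : Bool) : String × Int :=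
  let boundary := if regex then "/" else "\""
  let tokens := ((PySem.Str.split? query " ").getD []).map PySem.Str.strip
  (mmqBuild col boundary tokens, (tokens.length : Int))

-- ===== PRECONDITION & SPEC =====
def Spec_make_multiword_query_py (query : String) (col : String) (regex : Bool) (out : String × Int) : Prop := out = make_multiword_query_py_alt query col regex
instance (query : String) (col : String) (regex : Bool) (out : String × Int) : Decidable (Spec_make_multiword_query_py query col regex out) := by unfold Spec_make_multiword_query_py; infer_instance

-- ===== CLAIM (what is proved, stated in full; the proofs are below) =====
def Claim_equal_make_multiword_query_py : Prop := ∀ (query : String) (col : String) (regex : Bool), Dom_make_multiword_query_py query col regex → Spec_make_multiword_query_py query col regex (make_multiword_query_py query col regex)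

-- ===== LEMMAS AND PROOFS =====

-- the per-token unit A's loop body produces, as a function of the whole token count n
def mmqRow (n : Nat) (col b : String) (it : Int × String) : String :=
  let leftbrack := if it.1 = 0 ∨ it.1 = (n : Int) - 1 then "" else "("
  let unit := leftbrack ++ col ++ b ++ it.2 ++ b
  if it.1 + 1 = (n : Int) then unit ++ String.ofList (List.replicate (n - 2) ')') else unit

-- the parenthesised tail '(u1 + (u2 + … ))' shared by both shapes
def mmqTail (col b : String) : List String → String
  | [] => ""
  | [t] => mmqUnit col b t
  | t :: r1 :: rest => "(" ++ mmqUnit col b t ++ " + " ++ mmqTail col b (r1 :: rest) ++ ")"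

theorem strJoin_nil (sep : String) : PySem.Str.join sep [] = "" := by
  apply String.toList_inj.mp
  simp [PySem.Str.toList_join, PySem.Chars.join_nil]

theorem strJoin_singleton (sep p : String) : PySem.Str.join sep [p] = p := by
  apply String.toList_inj.mp
  simp [PySem.Str.toList_join, PySem.Chars.join_singleton]

theorem strJoin_cons_cons (sep p q : String) (rest : List String) :
    PySem.Str.join sep (p :: q :: rest) = p ++ sep ++ PySem.Str.join sep (q :: rest) := by
  apply String.toList_inj.mp
  simp [PySem.Str.toList_join, String.toList_append, PySem.Chars.join_cons_cons]

theorem strJoin_cons_of_ne_nil (sep p : String) (l : List String) (h : l ≠ []) :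
    PySem.Str.join sep (p :: l) = p ++ sep ++ PySem.Str.join sep l := by
  cases l with
  | nil => exact absurd rfl h
  | cons q r => exact strJoin_cons_cons sep p q r

theorem strRepl_succ (k : Nat) :
    String.ofList (List.replicate (k + 1) ')') = ")" ++ String.ofList (List.replicate k ')') := by
  apply String.toList_inj.mp
  simp [String.toList_append, List.replicate_succ]

-- the tail of A's row list, starting at index k+1 of n = k+1+|l| tokens
theorem mmq_tail_eq (col b : String) (l : List String) : ∀ (k : Nat), l ≠ [] →
    PySem.Str.join " + " ((PySem.List.enumerate l ((k : Int) + 1)).map (mmqRow (k + 1 + l.length) col b))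
      = mmqTail col b l ++ String.ofList (List.replicate k ')') := by
  induction l with
  | nil => intro k h; exact absurd rfl h
  | cons t l ih =>
    intro k _
    cases l with
    | nil =>
        rw [PySem.List.enumerate_cons, PySem.List.enumerate_nil]
        simp only [List.map_cons, List.map_nil, strJoin_singleton, mmqRow, mmqTail, List.length_cons,
          List.length_nil]
        rw [if_pos (Or.inr (by push_cast; ring)), if_pos (by push_cast; ring)]
        have h2 : 0 + 1 + 1 - 2 = 0 + 0 := by omega
        simp [mmqUnit, String.empty_append, String.append_assoc]
    | cons r1 rest =>
        rw [PySem.List.enumerate_cons, List.map_cons,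
          strJoin_cons_of_ne_nil _ _ _ (by simp [PySem.List.enumerate_cons])]
        have hrow : mmqRow (k + 1 + (t :: r1 :: rest).length) col b ((k : Int) + 1, t)
            = "(" ++ mmqUnit col b t := by
          simp only [mmqRow, List.length_cons]
          rw [if_neg (by push_cast; omega), if_neg (by push_cast; omega)]
          simp [mmqUnit, String.append_assoc]
        have hn : k + 1 + (t :: r1 :: rest).length = (k + 1) + 1 + (r1 :: rest).length := by
          simp [List.length_cons]; omega
        have hc : ((k : Int) + 1) + 1 = ((k + 1 : Nat) : Int) + 1 := by push_cast; ring
        rw [hrow, hn, hc, ih (k + 1) (by simp)]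
        rw [strRepl_succ]
        simp only [mmqTail, String.append_assoc]

theorem mmq_build_tail (col b : String) (l : List String) : ∀ (t : String), l ≠ [] →
    "(" ++ mmqBuild col b (t :: l) ++ ")" = mmqTail col b (t :: l) := by
  induction l with
  | nil => intro t h; exact absurd rfl h
  | cons r l ih =>
    intro t _
    cases l with
    | nil => simp [mmqBuild, mmqTail, String.append_assoc]
    | cons r2 l2 =>
        have := ih r (by simp)
        simp only [mmqBuild, mmqTail] at this ⊢
        rw [← this]
        have hp : (" + (" : String) = " + " ++ "(" := by
          apply String.toList_inj.mp; simp
        simp only [String.append_assoc]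
        rw [hp, String.append_assoc]

theorem mmq_main (col b : String) (ts : List String) :
    PySem.Str.join " + " ((PySem.List.enumerate ts 0).map (mmqRow ts.length col b))
      = mmqBuild col b ts := by
  cases ts with
  | nil => simp [PySem.List.enumerate_nil, strJoin_nil, mmqBuild]
  | cons t l =>
    cases l with
    | nil =>
        rw [PySem.List.enumerate_cons, PySem.List.enumerate_nil]
        simp only [List.map_cons, List.map_nil, strJoin_singleton, mmqRow, mmqBuild, List.length_cons,
          List.length_nil]
        norm_num [mmqUnit, String.empty_append, String.append_empty, String.append_assoc,
          List.replicate_zero, String.ofList_nil]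
    | cons t2 l2 =>
      cases l2 with
      | nil =>
          rw [PySem.List.enumerate_cons, PySem.List.enumerate_cons, PySem.List.enumerate_nil]
          simp only [List.map_cons, List.map_nil, strJoin_cons_cons, strJoin_singleton, mmqRow,
            mmqBuild, List.length_cons, List.length_nil]
          norm_num [mmqUnit, String.empty_append, String.append_empty, String.append_assoc,
            List.replicate_zero, String.ofList_nil]
      | cons t3 l3 =>
          rw [PySem.List.enumerate_cons, List.map_cons,
            strJoin_cons_of_ne_nil _ _ _ (by simp [PySem.List.enumerate_cons])]
          have hrow : mmqRow (t :: t2 :: t3 :: l3).length col b (0, t) = mmqUnit col b t := by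
            simp only [mmqRow, List.length_cons]
            rw [if_neg (by push_cast; omega), if_pos (Or.inl trivial)]
            simp [mmqUnit, String.empty_append, String.append_assoc]
          have hn : (t :: t2 :: t3 :: l3).length = 0 + 1 + (t2 :: t3 :: l3).length := by
            simp only [List.length_cons]; omega
          have hc : (0 + 1 : Int) = ((0 : Nat) : Int) + 1 := by norm_num
          rw [hrow, hn, hc, mmq_tail_eq col b (t2 :: t3 :: l3) 0 (by simp)]
          rw [← mmq_build_tail col b (t3 :: l3) t2 (by simp)]
          have hp : (" + (" : String) = " + " ++ "(" := by
            apply String.toList_inj.mp; simp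
          simp only [mmqBuild, List.replicate_zero]
          have he : String.ofList ([] : List Char) = "" := rfl
          simp only [he, String.append_empty, String.append_assoc]
          rw [hp, String.append_assoc]

-- ===== VERDICT (by name: the statement is the Claim_ definition above) =====
theorem make_multiword_query_py_spec : Claim_equal_make_multiword_query_py := by
  intro query col regex _
  unfold Spec_make_multiword_query_py make_multiword_query_py make_multiword_query_py_alt
  simp only [PySem.List.foldl_append_singleton_eq_map, List.nil_append]
  exact congrArg (fun s => (s, _)) (mmq_main col _ _)
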